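-- pv_equiv track=rewrite | github.com/LiuHarry1/ai-prompt-engineering | narrative_format/format_postprocessing.py | completion_post_processing
-- ===== SOURCE A (Python) =====
-- def substring_to_word(input_string:str, word):
--     index = input_string.find(word)
--
--     if index != -1:
--         return input_string[:index]
--     else:
--         return input_string
--
-- def remove_notes(completion):
--     completion = substring_to_word(completion, "Note:")
--     return completion
--
-- def remove_repetive_examples(completion):
--     completion = substring_to_word(completion, "Input Text:")
--
--     return completion
--
-- def completion_post_processing(completion_list):
--
--     processed_completions =[]
--     for completion in completion_list:
--         completion = remove_notes(completion)
--         completion = remove_repetive_examples(completion)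
--         completion = substring_to_word(completion, "Please provide the next input text.")
--         completion = substring_to_word(completion, "Explanation:")
--         completion = completion.strip()
--         completion = remove_line_breaks(completion)
--         processed_completions.append(completion)
--
--     return processed_completions
--
-- def remove_line_breaks(text: str):
--     # return text.replace('\n', ' ').replace('\r', '')
--     return " ".join([word for word in text.split()])
-- ===== SOURCE B (Python) =====
-- MARKERS = ("Note:", "Input Text:", "Please provide the next input text.", "Explanation:")
--
--
-- def _clean(completion):
--     cuts = [p for p in (completion.find(m) for m in MARKERS) if p != -1]
--     if cuts:
--         completion = completion[:min(cuts)]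
--     return " ".join(completion.strip().split())
--
--
-- def completion_post_processing(completion_list):
--     return [_clean(completion) for completion in completion_list]
-- ===== Notes on version B (the rewrite author's own statement) =====
-- stated objective: simpler
-- what changed: Replaces the four sequential prefix-truncation passes with one earliest-marker computation (min over the non-(-1) find positions in the original string) followed by a single slice, and builds the result list with a comprehension over a helper instead of a loop with append.
import Mathlib
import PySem

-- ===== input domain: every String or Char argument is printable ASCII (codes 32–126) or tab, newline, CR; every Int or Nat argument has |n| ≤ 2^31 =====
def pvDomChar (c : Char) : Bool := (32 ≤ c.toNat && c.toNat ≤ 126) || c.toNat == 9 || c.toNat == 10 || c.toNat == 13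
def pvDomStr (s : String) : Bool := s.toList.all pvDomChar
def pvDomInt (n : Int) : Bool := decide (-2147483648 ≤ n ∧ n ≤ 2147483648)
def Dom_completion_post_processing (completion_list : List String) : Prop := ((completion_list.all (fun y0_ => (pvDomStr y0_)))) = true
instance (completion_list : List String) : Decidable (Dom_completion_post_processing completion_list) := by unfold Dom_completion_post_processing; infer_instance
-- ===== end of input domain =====

-- B replaces A's four sequential prefix-truncation passes by one earliest-marker cut
-- (min of the non-(-1) find positions) followed by a single slice; objective: simpler.

-- ===== PORT A =====
def substring_to_word (input_string : String) (word : String) : String :=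
  let index := PySem.Str.find input_string word
  if index ≠ -1 then PySem.Str.slice input_string none (some index) else input_string

def remove_notes (completion : String) : String :=
  substring_to_word completion "Note:"

def remove_repetive_examples (completion : String) : String :=
  substring_to_word completion "Input Text:"

def remove_line_breaks (text : String) : String :=
  PySem.Str.join " " ((PySem.Str.split₀ text).map (fun word => word))

def completion_post_processing (completion_list : List String) : List String :=
  completion_list.foldl (fun processed_completions completion =>
    let c1 := remove_notes completion
    let c2 := remove_repetive_examples c1
    let c3 := substring_to_word c2 "Please provide the next input text."
    let c4 := substring_to_word c3 "Explanation:"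
    let c5 := PySem.Str.strip c4
    let c6 := remove_line_breaks c5
    processed_completions ++ [c6]) []

-- ===== PORT B =====
def pvMarkers : List String :=
  ["Note:", "Input Text:", "Please provide the next input text.", "Explanation:"]

def pvClean (completion : String) : String :=
  let cuts := (pvMarkers.map (fun m => PySem.Str.find completion m)).filter (fun p => p ≠ -1)
  let completion' :=
    match PySem.List.min? cuts (fun p => p) with
    | some m => PySem.Str.slice completion none (some m)
    | none => completion
  PySem.Str.join " " (PySem.Str.split₀ (PySem.Str.strip completion'))

def completion_post_processing_alt (completion_list : List String) : List String :=
  completion_list.map pvClean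

-- ===== PRECONDITION & SPEC =====
def Spec_completion_post_processing (completion_list : List String) (out : List String) : Prop := out = completion_post_processing_alt completion_list
instance (completion_list : List String) (out : List String) : Decidable (Spec_completion_post_processing completion_list out) := by unfold Spec_completion_post_processing; infer_instance

-- ===== CLAIM (what is proved, stated in full; the proofs are below) =====
def Claim_equal_completion_post_processing : Prop := ∀ (completion_list : List String), Dom_completion_post_processing completion_list → Spec_completion_post_processing completion_list (completion_post_processing completion_list)

-- ===== LEMMAS AND PROOFS =====

-- the markers as character lists
def pvMc : List (List Char) := pvMarkers.map String.toList

theorem pvMc_eq : pvMc = ["Note:".toList, "Input Text:".toList,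
    "Please provide the next input text.".toList, "Explanation:".toList] := rfl

-- the cut A performs, at the character-list level
def pvCutC (l w : List Char) : List Char :=
  if PySem.Chars.find l w ≠ -1 then PySem.List.slice l none (some (PySem.Chars.find l w)) else l

-- B's cut, at the character-list level
def pvBcut (l : List Char) : List Char :=
  match PySem.List.min? ((pvMc.map (fun w => PySem.Chars.find l w)).filter (fun p => p ≠ -1)) (fun p => p) with
  | some m => PySem.List.slice l none (some m)
  | none => l

-- where a single marker cuts l (length of the kept prefix)
def pvCutpt (l w : List Char) : Nat :=
  if PySem.Chars.find l w = -1 then l.length else (PySem.Chars.find l w).toNat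

-- n is the length of l or the start of a marker occurrence in l
def pvAnchor (l : List Char) (n : Nat) : Prop :=
  n = l.length ∨ ∃ w ∈ pvMc, w <+: l.drop n

set_option maxRecDepth 4000 in
theorem pv_markers_ne_nil : ∀ w ∈ pvMc, w ≠ [] := by
  rw [pvMc_eq]; intro w hw
  simp only [List.mem_cons, List.not_mem_nil, or_false] at hw
  rcases hw with h|h|h|h <;> subst h <;> simp

theorem pv_noOv_bool :
    (pvMc.all (fun v => pvMc.all (fun w => v.tail.all (fun c => !(w.head? == some c))))) = true := rfl

-- no character of any marker's tail is the first character of a marker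
theorem pv_noOv : ∀ v ∈ pvMc, ∀ w ∈ pvMc, ∀ c ∈ v.tail, w.head? ≠ some c := by
  have h := pv_noOv_bool
  simp only [List.all_eq_true, Bool.not_eq_eq_eq_not, Bool.not_true, beq_eq_false_iff_ne, ne_eq] at h
  exact h

theorem pv_stw_toList (s w : String) :
    (substring_to_word s w).toList = pvCutC s.toList w.toList := by
  unfold substring_to_word pvCutC
  simp only [PySem.Str.find_eq]
  split_ifs with h
  · simp [PySem.Str.toList_slice]
  · rfl

-- an occurrence of v straddling the start of an occurrence of w forces a tail/head character match
theorem pv_straddle {l v w : List Char} {q n : Nat} (hv : v <+: l.drop q) (hw : w <+: l.drop n)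
    (hwne : w ≠ []) (h1 : q < n) (h2 : n < q + v.length) :
    ∃ c ∈ v.tail, w.head? = some c := by
  obtain ⟨t, ht⟩ := hv
  obtain ⟨u, hu⟩ := hw
  have hd : n - q < v.length := by omega
  have e1 : l[n]? = v[n - q]? := by
    have : (l.drop q)[n - q]? = l[n]? := by
      rw [List.getElem?_drop]; congr 1; omega
    rw [← this, ← ht, List.getElem?_append_left hd]
  have e2 : l[n]? = w.head? := by
    have : (l.drop n)[0]? = l[n]? := by simp
    rw [← this, ← hu]
    cases w with
    | nil => exact absurd rfl hwne
    | cons a w' => rfl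
  obtain ⟨c, hc⟩ : ∃ c, v[n - q]? = some c := by
    exact ⟨v[n - q]'hd, List.getElem?_eq_getElem hd⟩
  refine ⟨c, ?_, by rw [← e2, e1, hc]⟩
  have : v.tail[n - q - 1]? = some c := by
    rw [← List.drop_one, List.getElem?_drop]
    rw [← hc]; congr 1; omega
  exact List.mem_of_getElem? this

-- an occurrence inside a prefix is an occurrence in the whole list (with room)
theorem pv_occ_take_iff (l v : List Char) (n i : Nat) :
    v <+: (l.take n).drop i ↔ v <+: l.drop i ∧ v.length ≤ n - i := by
  rw [List.drop_take, List.prefix_take_iff]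

-- if the first occurrence of v starts before an anchored n, it ends by n
theorem pv_fit (l v : List Char) (n : Nat) (hn : n ≤ l.length) (hvM : v ∈ pvMc)
    (hanch : pvAnchor l n) {i : Nat} (hocc : v <+: l.drop i) (hin : i < n) :
    i + v.length ≤ n := by
  rcases hanch with h | ⟨w, hwM, hw⟩
  · have := hocc.length_le
    simp only [List.length_drop] at this
    omega
  · by_contra hcon
    obtain ⟨c, hcmem, hchead⟩ :=
      pv_straddle hocc hw (pv_markers_ne_nil w hwM) hin (by omega)
    exact pv_noOv v hvM w hwM c hcmem hchead

theorem pv_find_take (l v : List Char) (n : Nat) (hn : n ≤ l.length) (hvM : v ∈ pvMc)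
    (hanch : pvAnchor l n) :
    PySem.Chars.find (l.take n) v =
      if PySem.Chars.find l v ≠ -1 ∧ (PySem.Chars.find l v).toNat < n
      then PySem.Chars.find l v else -1 := by
  have hvne : v ≠ [] := pv_markers_ne_nil v hvM
  have hvlen : 0 < v.length := List.length_pos_iff.mpr hvne
  by_cases hocc : PySem.Chars.find (l.take n) v = -1
  · rw [hocc, if_neg]
    rintro ⟨hF, hFn⟩
    have hF0 : 0 ≤ PySem.Chars.find l v := by
      have := PySem.Chars.neg_one_le_find l v; omega
    obtain ⟨hpre, -⟩ := PySem.Chars.find_spec hF0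
    have hfit := pv_fit l v n hn hvM hanch hpre hFn
    have : v <+: (l.take n).drop (PySem.Chars.find l v).toNat := by
      rw [pv_occ_take_iff]; exact ⟨hpre, by omega⟩
    exact ((PySem.Chars.find_eq_neg_one_iff _ _).mp hocc)
      (this.isInfix.trans (List.drop_suffix _ _).isInfix)
  · have hG0 : 0 ≤ PySem.Chars.find (l.take n) v := by
      have := PySem.Chars.neg_one_le_find (l.take n) v; omega
    obtain ⟨hGpre, hGmin⟩ := PySem.Chars.find_spec hG0
    set G : Nat := (PySem.Chars.find (l.take n) v).toNat with hGdef
    obtain ⟨hGl, hGroom⟩ := (pv_occ_take_iff l v n G).mp hGpre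
    have hF : PySem.Chars.find l v ≠ -1 := by
      rw [PySem.Chars.find_ne_neg_one_iff]
      rw [← PySem.Chars.isIn_iff_infix, ← PySem.Chars.exists_prefix_drop_iff_isIn]
      exact ⟨G, hGl⟩
    have hF0 : 0 ≤ PySem.Chars.find l v := by
      have := PySem.Chars.neg_one_le_find l v; omega
    obtain ⟨hFpre, hFmin⟩ := PySem.Chars.find_spec hF0
    set F : Nat := (PySem.Chars.find l v).toNat with hFdef
    have hFG : F ≤ G := by
      by_contra hcon
      exact hFmin G (by omega) hGl
    have hGn : G < n := by omega
    have hFn : F < n := by omega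
    have hfit := pv_fit l v n hn hvM hanch hFpre hFn
    have hFintake : v <+: (l.take n).drop F := by
      rw [pv_occ_take_iff]; exact ⟨hFpre, by omega⟩
    have hGF : G ≤ F := by
      by_contra hcon
      exact hGmin F (by omega) hFintake
    rw [if_pos ⟨hF, by omega⟩]
    omega

theorem pv_cut_take (l v : List Char) (n : Nat) (hn : n ≤ l.length) (hvM : v ∈ pvMc)
    (hanch : pvAnchor l n) :
    pvCutC (l.take n) v = l.take (min n (pvCutpt l v)) := by
  unfold pvCutC
  rw [pv_find_take l v n hn hvM hanch]
  by_cases hc : PySem.Chars.find l v ≠ -1 ∧ (PySem.Chars.find l v).toNat < n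
  · rw [if_pos hc, if_pos hc.1]
    have hF0 : 0 ≤ PySem.Chars.find l v := by
      have := PySem.Chars.neg_one_le_find l v; omega
    rw [PySem.List.slice_to _ hF0, List.take_take]
    unfold pvCutpt
    rw [if_neg hc.1]
    congr 1
    omega
  · rw [if_neg hc, if_neg (by simp)]
    unfold pvCutpt
    by_cases hF : PySem.Chars.find l v = -1
    · rw [if_pos hF]; congr 1; omega
    · rw [if_neg hF]; congr 1; push Not at hc; have := hc hF; omega

theorem pv_anchor_step (l v : List Char) (n : Nat) (hn : n ≤ l.length) (hvM : v ∈ pvMc)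
    (hanch : pvAnchor l n) : pvAnchor l (min n (pvCutpt l v)) := by
  unfold pvCutpt
  by_cases hF : PySem.Chars.find l v = -1
  · rw [if_pos hF]
    rcases Nat.le_total n l.length with h | h
    · rw [min_eq_left h]; exact hanch
    · rw [min_eq_right h]; exact Or.inl rfl
  · rw [if_neg hF]
    have hF0 : 0 ≤ PySem.Chars.find l v := by
      have := PySem.Chars.neg_one_le_find l v; omega
    rcases Nat.le_total n (PySem.Chars.find l v).toNat with h | h
    · rw [min_eq_left h]; exact hanch
    · rw [min_eq_right h]
      exact Or.inr ⟨v, hvM, (PySem.Chars.find_spec hF0).1⟩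

theorem pv_mem_m1 : "Note:".toList ∈ pvMc := by rw [pvMc_eq]; exact List.mem_cons_self
theorem pv_mem_m2 : "Input Text:".toList ∈ pvMc := by
  rw [pvMc_eq]; exact List.mem_cons_of_mem _ List.mem_cons_self
theorem pv_mem_m3 : "Please provide the next input text.".toList ∈ pvMc := by
  rw [pvMc_eq]; exact List.mem_cons_of_mem _ (List.mem_cons_of_mem _ List.mem_cons_self)
theorem pv_mem_m4 : "Explanation:".toList ∈ pvMc := by
  rw [pvMc_eq]
  exact List.mem_cons_of_mem _ (List.mem_cons_of_mem _ (List.mem_cons_of_mem _ List.mem_cons_self))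

def pvN (l : List Char) : Nat :=
  min (min (min (min l.length (pvCutpt l "Note:".toList)) (pvCutpt l "Input Text:".toList))
    (pvCutpt l "Please provide the next input text.".toList)) (pvCutpt l "Explanation:".toList)

theorem pv_chain_eq (l : List Char) :
    pvCutC (pvCutC (pvCutC (pvCutC l "Note:".toList) "Input Text:".toList)
        "Please provide the next input text.".toList) "Explanation:".toList = l.take (pvN l) := by
  have h0 : pvAnchor l l.length := Or.inl rfl
  have e0 : l = l.take l.length := (List.take_length).symm
  rw [show pvCutC l "Note:".toList = pvCutC (l.take l.length) "Note:".toList from by rw [← e0]]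
  rw [pv_cut_take l _ l.length le_rfl pv_mem_m1 h0]
  have h1 := pv_anchor_step l "Note:".toList l.length le_rfl pv_mem_m1 h0
  rw [pv_cut_take l _ _ (by omega) pv_mem_m2 h1]
  have h2 := pv_anchor_step l "Input Text:".toList _ (by omega) pv_mem_m2 h1
  rw [pv_cut_take l _ _ (by omega) pv_mem_m3 h2]
  have h3 := pv_anchor_step l "Please provide the next input text.".toList _ (by omega) pv_mem_m3 h2
  rw [pv_cut_take l _ _ (by omega) pv_mem_m4 h3]
  rfl

theorem pv_bcut_eq (l : List Char) : pvBcut l = l.take (pvN l) := by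
  unfold pvBcut
  have hmap : pvMc.map (fun w => PySem.Chars.find l w) =
      [PySem.Chars.find l "Note:".toList, PySem.Chars.find l "Input Text:".toList,
       PySem.Chars.find l "Please provide the next input text.".toList,
       PySem.Chars.find l "Explanation:".toList] := by rw [pvMc_eq]; rfl
  rw [hmap]
  cases hm : PySem.List.min?
      ([PySem.Chars.find l "Note:".toList, PySem.Chars.find l "Input Text:".toList,
        PySem.Chars.find l "Please provide the next input text.".toList,
        PySem.Chars.find l "Explanation:".toList].filter (fun p => p ≠ -1)) (fun p => p) with
  | none =>
    have hnil := (PySem.List.min?_eq_none_iff _ _).mp hm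
    have hall := List.filter_eq_nil_iff.mp hnil
    simp only [List.mem_cons, List.not_mem_nil, or_false, ne_eq, decide_not,
      Bool.not_eq_true', decide_eq_false_iff_not, not_not] at hall
    have e1 := hall _ (Or.inl rfl)
    have e2 := hall _ (Or.inr (Or.inl rfl))
    have e3 := hall _ (Or.inr (Or.inr (Or.inl rfl)))
    have e4 := hall _ (Or.inr (Or.inr (Or.inr rfl)))
    unfold pvN pvCutpt
    rw [if_pos e1, if_pos e2, if_pos e3, if_pos e4]
    simp
  | some m =>
    have hmem := PySem.List.min?_mem hm
    have hmin := PySem.List.min?_isMin hm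
    rw [List.mem_filter] at hmem
    obtain ⟨hmem4, hmne⟩ := hmem
    have hmne' : m ≠ -1 := by simpa using hmne
    simp only [List.mem_cons, List.not_mem_nil, or_false] at hmem4
    have hm0 : 0 ≤ m := by
      have hge : -1 ≤ m := by
        rcases hmem4 with h|h|h|h <;> (rw [h]; exact PySem.Chars.neg_one_le_find l _)
      omega
    show PySem.List.slice l none (some m) = List.take (pvN l) l
    rw [PySem.List.slice_to _ hm0]
    congr 1
    -- m.toNat = pvN l
    have hlow : ∀ x ∈ [PySem.Chars.find l "Note:".toList, PySem.Chars.find l "Input Text:".toList,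
        PySem.Chars.find l "Please provide the next input text.".toList,
        PySem.Chars.find l "Explanation:".toList], x ≠ -1 → m ≤ x := by
      intro x hx hxne
      exact hmin x (List.mem_filter.mpr ⟨hx, by simpa using hxne⟩)
    have hlen : m ≤ (l.length : Int) := by
      rcases hmem4 with h|h|h|h <;> (rw [h]; exact PySem.Chars.find_le_length l _)
    have hcut : ∀ w, PySem.Chars.find l w ≠ -1 → m ≤ PySem.Chars.find l w →
        m.toNat ≤ pvCutpt l w := by
      intro w hne hle
      unfold pvCutpt; rw [if_neg hne]; omega
    unfold pvN
    have b1 := hlow _ List.mem_cons_self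
    have b2 := hlow _ (List.mem_cons_of_mem _ List.mem_cons_self)
    have b3 := hlow _ (List.mem_cons_of_mem _ (List.mem_cons_of_mem _ List.mem_cons_self))
    have b4 := hlow _ (List.mem_cons_of_mem _ (List.mem_cons_of_mem _ (List.mem_cons_of_mem _ List.mem_cons_self)))
    -- each of the four cut points is ≥ m.toNat, and one of them equals m.toNat
    have hge : ∀ w, (PySem.Chars.find l w = -1 → m.toNat ≤ pvCutpt l w) := by
      intro w h; unfold pvCutpt; rw [if_pos h]; omega
    have c1 : m.toNat ≤ pvCutpt l "Note:".toList := by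
      by_cases h : PySem.Chars.find l "Note:".toList = -1
      · exact hge _ h
      · exact hcut _ h (b1 h)
    have c2 : m.toNat ≤ pvCutpt l "Input Text:".toList := by
      by_cases h : PySem.Chars.find l "Input Text:".toList = -1
      · exact hge _ h
      · exact hcut _ h (b2 h)
    have c3 : m.toNat ≤ pvCutpt l "Please provide the next input text.".toList := by
      by_cases h : PySem.Chars.find l "Please provide the next input text.".toList = -1
      · exact hge _ h
      · exact hcut _ h (b3 h)
    have c4 : m.toNat ≤ pvCutpt l "Explanation:".toList := by
      by_cases h : PySem.Chars.find l "Explanation:".toList = -1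
      · exact hge _ h
      · exact hcut _ h (b4 h)
    have heq : pvCutpt l "Note:".toList = m.toNat ∨ pvCutpt l "Input Text:".toList = m.toNat ∨
        pvCutpt l "Please provide the next input text.".toList = m.toNat ∨
        pvCutpt l "Explanation:".toList = m.toNat := by
      rcases hmem4 with h|h|h|h
      · left; unfold pvCutpt; rw [if_neg (h ▸ hmne'), ← h]
      · right; left; unfold pvCutpt; rw [if_neg (h ▸ hmne'), ← h]
      · right; right; left; unfold pvCutpt; rw [if_neg (h ▸ hmne'), ← h]
      · right; right; right; unfold pvCutpt; rw [if_neg (h ▸ hmne'), ← h]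
    have hlen' : m.toNat ≤ l.length := by omega
    rcases heq with h|h|h|h <;> omega

theorem pv_jss_congr {x y : String} (h : x.toList = y.toList) :
    PySem.Str.join " " (PySem.Str.split₀ (PySem.Str.strip x)) =
      PySem.Str.join " " (PySem.Str.split₀ (PySem.Str.strip y)) := by
  unfold PySem.Str.join PySem.Str.split₀ PySem.Str.strip
  rw [h]

theorem pv_pointwise (s : String) :
    remove_line_breaks (PySem.Str.strip (substring_to_word (substring_to_word
      (remove_repetive_examples (remove_notes s)) "Please provide the next input text.") "Explanation:")) =
      pvClean s := by
  have hA : (substring_to_word (substring_to_word (remove_repetive_examples (remove_notes s))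
      "Please provide the next input text.") "Explanation:").toList = s.toList.take (pvN s.toList) := by
    unfold remove_notes remove_repetive_examples
    rw [pv_stw_toList, pv_stw_toList, pv_stw_toList, pv_stw_toList]
    exact pv_chain_eq s.toList
  have hmap2 : (pvMarkers.map (fun m => PySem.Str.find s m)).filter (fun p => decide (p ≠ -1))
      = (pvMc.map (fun w => PySem.Chars.find s.toList w)).filter (fun p => decide (p ≠ -1)) := by
    congr 1
  unfold pvClean remove_line_breaks
  simp only [List.map_id']
  rw [hmap2]
  cases hm : PySem.List.min?
      ((pvMc.map (fun w => PySem.Chars.find s.toList w)).filter (fun p => decide (p ≠ -1)))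
      (fun p => p) with
  | none =>
    have hb : pvBcut s.toList = s.toList := by unfold pvBcut; rw [hm]
    exact pv_jss_congr (by rw [hA, ← pv_bcut_eq, hb])
  | some m =>
    have hb : pvBcut s.toList = PySem.List.slice s.toList none (some m) := by
      unfold pvBcut; rw [hm]
    exact pv_jss_congr (by
      rw [hA, ← pv_bcut_eq, hb, PySem.Str.toList_slice]
      simp)

-- ===== VERDICT (by name: the statement is the Claim_ definition above) =====
theorem completion_post_processing_spec : Claim_equal_completion_post_processing := by
  intro cl _
  unfold Spec_completion_post_processing completion_post_processing completion_post_processing_alt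
  rw [PySem.List.foldl_append_singleton_eq_map]
  simp only [List.nil_append]
  exact List.map_congr_left (fun s _ => pv_pointwise s)
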